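-- pv_equiv track=rewrite | github.com/c0ngthanh/AI | lightup/hillclimbing.py | check_bulb_conflict
-- ===== SOURCE A (Python) =====
-- def check_bulb_conflict(matrix):
--     # check rows
--     conflict = 0
--     n = len(matrix)
--     for i in range(n):
--         bulb = 0
--         for j in range(n):
--             cell = matrix[i][j]
--             if cell == 6:
--                 bulb+=1
--             if cell < 6 and j == n-1:
--                 if bulb > 1:
--                     conflict += bulb - 1
--     # check cols
--     for i in range(n):
--         bulb = 0
--         for j in range(n):
--             cell = matrix[j][i]
--             if cell == 6:
--                 bulb+=1
--             if cell < 6 and j == n-1: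
--                 if bulb > 1:
--                     conflict += bulb - 1
--     return conflict
-- ===== SOURCE B (Python) =====
-- def check_bulb_conflict(matrix):
--     # Single fused scan: count row bulbs and per-column bulbs together,
--     # then settle the column conflicts against the last row's gates.
--     n = len(matrix)
--     if n == 0:
--         return 0
--     conflict = 0
--     col_bulb = [0] * n
--     for row in matrix:
--         rb = 0
--         for j in range(n):
--             if row[j] == 6:
--                 rb += 1
--                 col_bulb[j] += 1
--         if row[n - 1] < 6 and rb > 1:
--             conflict += rb - 1
--     last = matrix[n - 1]
--     for i in range(n):
--         if last[i] < 6 and col_bulb[i] > 1: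
--             conflict += col_bulb[i] - 1
--     return conflict
-- ===== Notes on version B (the rewrite author's own statement) =====
-- stated objective: faster
-- what changed: A makes two full n*n index-based scans (rows, then columns, each re-reading every cell via matrix[i][j] and re-testing j==n-1 inside the inner loop); B makes one fused pass over the rows that counts row bulbs and accumulates a per-column bulb table col_bulb, then settles the column conflicts with a single O(n) sweep against the last row's gates.
-- outside the precondition, e.g. on check_bulb_conflict([[6, 6], [6]]): A raises IndexError, B raises IndexError
import Mathlib
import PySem

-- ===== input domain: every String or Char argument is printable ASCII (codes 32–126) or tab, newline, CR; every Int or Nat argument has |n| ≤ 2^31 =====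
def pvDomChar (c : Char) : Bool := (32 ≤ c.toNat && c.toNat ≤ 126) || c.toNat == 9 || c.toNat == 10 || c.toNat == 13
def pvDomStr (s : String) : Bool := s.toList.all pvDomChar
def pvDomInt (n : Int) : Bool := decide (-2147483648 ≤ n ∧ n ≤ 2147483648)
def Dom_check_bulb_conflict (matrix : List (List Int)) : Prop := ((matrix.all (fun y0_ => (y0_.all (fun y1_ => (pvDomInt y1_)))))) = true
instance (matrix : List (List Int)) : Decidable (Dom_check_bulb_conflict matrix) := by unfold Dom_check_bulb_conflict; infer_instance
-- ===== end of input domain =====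

-- B replaces A's two full n×n scans by one fused scan that counts row bulbs and
-- per-column bulbs together (objective: faster, constant factor).

-- ===== PORT A =====
-- A's inner 'for j in range(n)' body (identical in both of A's loops); state = (conflict, bulb)
def innerA (n : Int) (cell : Int → Int) (c0 : Int) : Int × Int :=
  (PySem.List.pyRange 0 n 1).foldl (fun s j =>
    let c := cell j
    let b := if c = 6 then s.2 + 1 else s.2
    (if c < 6 ∧ j = n - 1 then (if b > 1 then s.1 + (b - 1) else s.1) else s.1, b)) (c0, 0)

def check_bulb_conflict (matrix : List (List Int)) : Int :=
  let n : Int := (matrix.length : Int)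
  -- check rows
  let conflict := (PySem.List.pyRange 0 n 1).foldl
    (fun conflict i => (innerA n (fun j => PySem.List.pyGetD (PySem.List.pyGetD matrix i []) j 0) conflict).1) 0
  -- check cols
  (PySem.List.pyRange 0 n 1).foldl
    (fun conflict i => (innerA n (fun j => PySem.List.pyGetD (PySem.List.pyGetD matrix j []) i 0) conflict).1) conflict

-- ===== PORT B =====
-- B's inner 'for j in range(n)': counts the row's bulbs and bumps col_bulb[j]
-- ('col_bulb[j] += 1' ported as set-at-j.toNat; exact since j ≥ 0 here)
def innerB (n : Int) (row : List Int) (cb : List Int) : Int × List Int :=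
  (PySem.List.pyRange 0 n 1).foldl (fun t j =>
    if PySem.List.pyGetD row j 0 = 6 then
      (t.1 + 1, t.2.set j.toNat (PySem.List.pyGetD t.2 j 0 + 1))
    else t) (0, cb)

def check_bulb_conflict_alt (matrix : List (List Int)) : Int :=
  let n : Int := (matrix.length : Int)
  if n = 0 then 0 else
    let s := matrix.foldl (fun (s : Int × List Int) row =>
      let t := innerB n row s.2
      (if PySem.List.pyGetD row (n - 1) 0 < 6 ∧ t.1 > 1 then s.1 + (t.1 - 1) else s.1, t.2))
      (0, List.replicate matrix.length 0)
    let last := PySem.List.pyGetD matrix (n - 1) []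
    (PySem.List.pyRange 0 n 1).foldl (fun conflict i =>
      let cb := PySem.List.pyGetD s.2 i 0
      if PySem.List.pyGetD last i 0 < 6 ∧ cb > 1 then conflict + (cb - 1) else conflict) s.1

-- ===== PRECONDITION & SPEC =====
-- Pre_ excludes exactly the inputs where the Python A raises IndexError: some row
-- shorter than the number of rows (both Pythons index row[j] for j < len(matrix)).
def Pre_check_bulb_conflict (matrix : List (List Int)) : Prop :=
  ∀ row ∈ matrix, matrix.length ≤ row.length
instance (matrix : List (List Int)) : Decidable (Pre_check_bulb_conflict matrix) := by
  unfold Pre_check_bulb_conflict; infer_instance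

def pvWitness_check_bulb_conflict : List (List Int) := [[6, 0, 6], [1, 2, 3], [6, 4, 6]]

def Spec_check_bulb_conflict (matrix : List (List Int)) (out : Int) : Prop := out = check_bulb_conflict_alt matrix
instance (matrix : List (List Int)) (out : Int) : Decidable (Spec_check_bulb_conflict matrix out) := by unfold Spec_check_bulb_conflict; infer_instance

-- ===== CLAIM (what is proved, stated in full; the proofs are below) =====
def Claim_equal_check_bulb_conflict : Prop := ∀ (matrix : List (List Int)), Dom_check_bulb_conflict matrix → Pre_check_bulb_conflict matrix → Spec_check_bulb_conflict matrix (check_bulb_conflict matrix)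

-- ===== LEMMAS AND PROOFS =====

-- 0/1 indicator of a bulb
def ind6 (c : Int) : Int := if c = 6 then 1 else 0

-- number of bulbs among cell 0 .. cell (m-1)
def cnt (cell : Int → Int) (m : Nat) : Int :=
  ((PySem.List.pyRange 0 (m : Int) 1).map (fun j => ind6 (cell j))).sum

-- the conflict contribution of one line of length n (gate: last cell < 6)
def contrib (cell : Int → Int) (n : Nat) : Int :=
  if cell ((n : Int) - 1) < 6 ∧ cnt cell n > 1 then cnt cell n - 1 else 0

lemma cnt_zero (cell : Int → Int) : cnt cell 0 = 0 := by
  simp [cnt]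

lemma cnt_succ (cell : Int → Int) (m : Nat) :
    cnt cell (m + 1) = cnt cell m + ind6 (cell (m : Int)) := by
  unfold cnt
  rw [show ((m + 1 : Nat) : Int) = (m : Int) + 1 by push_cast; ring,
    PySem.List.pyRange_one_succ_right (by positivity)]
  simp

-- the prefix of A's inner loop (j < n-1) only counts bulbs
lemma innerA_prefix (n : Int) (cell : Int → Int) (m : Nat) (hm : (m : Int) ≤ n - 1)
    (c0 b0 : Int) :
    (PySem.List.pyRange 0 (m : Int) 1).foldl (fun s j =>
      let c := cell j
      let b := if c = 6 then s.2 + 1 else s.2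
      (if c < 6 ∧ j = n - 1 then (if b > 1 then s.1 + (b - 1) else s.1) else s.1, b))
      (c0, b0) = (c0, b0 + cnt cell m) := by
  induction m generalizing b0 with
  | zero => simp [cnt_zero]
  | succ k ih =>
    rw [show ((k + 1 : Nat) : Int) = (k : Int) + 1 by push_cast; ring,
      PySem.List.pyRange_one_succ_right (by positivity), List.foldl_append,
      ih (by omega)]
    have hk : (k : Int) ≠ n - 1 := by omega
    simp only [List.foldl_cons, List.foldl_nil, hk, and_false, if_false, cnt_succ, ind6]
    split <;> simp <;> ring

-- A's inner loop = (conflict + contribution, bulb count)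
lemma innerA_eq (n : Nat) (hn : 0 < n) (cell : Int → Int) (c0 : Int) :
    innerA (n : Int) cell c0 = (c0 + contrib cell n, cnt cell n) := by
  obtain ⟨k, rfl⟩ : ∃ k, n = k + 1 := ⟨n - 1, by omega⟩
  unfold innerA
  rw [show ((k + 1 : Nat) : Int) = (k : Int) + 1 by push_cast; ring,
    PySem.List.pyRange_one_succ_right (by positivity), List.foldl_append,
    innerA_prefix ((k : Int) + 1) cell k (by omega)]
  have hk1 : (k : Int) + 1 - 1 = (k : Int) := by ring
  simp only [List.foldl_cons, List.foldl_nil, contrib, cnt_succ, ind6, hk1]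
  by_cases h6 : cell (k : Int) = 6 <;> by_cases hlt : cell (k : Int) < 6 <;>
    simp [h6, hlt] <;> (try split) <;> simp <;> try omega

-- generic: fold of 'acc + (if p then f else 0)-style step' is init + sum
lemma foldl_ite_add (l : List Int) (p : Int → Prop) [DecidablePred p] (f : Int → Int)
    (init : Int) :
    l.foldl (fun acc x => if p x then acc + f x else acc) init
      = init + (l.map (fun x => if p x then f x else 0)).sum := by
  induction l generalizing init with
  | nil => simp
  | cons h t ih => simp only [List.foldl_cons, List.map_cons, List.sum_cons, ih]; split <;> ring

-- a set on a map-over-range stays a map-over-range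
lemma map_range_set (N m : Nat) (g : Nat → Int) (v : Int) :
    ((List.range N).map g).set m v
      = (List.range N).map (fun k => if k = m then v else g k) := by
  apply List.ext_getElem
  · simp
  · intro i h1 h2
    simp only [List.getElem_set, List.getElem_map, List.getElem_range]
    split <;> simp_all <;> omega

-- B's inner loop on a map-over-range column table: prefix of length m
lemma innerB_prefix (N : Nat) (row : List Int) (g : Nat → Int) (m : Nat) (hm : m ≤ N) (r0 : Int) :
    (PySem.List.pyRange 0 (m : Int) 1).foldl (fun t j =>
        if PySem.List.pyGetD row j 0 = 6 then
          (t.1 + 1, t.2.set j.toNat (PySem.List.pyGetD t.2 j 0 + 1))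
        else t)
      (r0, (List.range N).map g)
      = (r0 + cnt (fun j => PySem.List.pyGetD row j 0) m,
         (List.range N).map (fun k => if k < m then g k + ind6 (PySem.List.pyGetD row (k : Int) 0) else g k)) := by
  induction m with
  | zero => simp [cnt_zero]
  | succ p ih =>
    rw [show ((p + 1 : Nat) : Int) = (p : Int) + 1 by push_cast; ring,
      PySem.List.pyRange_one_succ_right (by positivity), List.foldl_append,
      ih (by omega)]
    have hget : PySem.List.pyGetD ((List.range N).map
        (fun k => if k < p then g k + ind6 (PySem.List.pyGetD row (k : Int) 0) else g k)) (p : Int) 0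
        = g p := by
      rw [PySem.List.pyGetD_natCast, List.getD_eq_getElem?_getD]
      simp [List.getElem?_range, Nat.lt_of_succ_le hm]
    simp only [List.foldl_cons, List.foldl_nil, Int.toNat_natCast, hget, map_range_set, cnt_succ]
    by_cases h6 : PySem.List.pyGetD row (p : Int) 0 = 6
    · have hind : ind6 (PySem.List.pyGetD row (p : Int) 0) = 1 := by
        unfold ind6; rw [if_pos h6]
      rw [if_pos h6, Prod.mk.injEq]
      refine ⟨by rw [hind]; ring, ?_⟩
      apply List.map_congr_left; intro k hk
      by_cases hkp : k = p
      · subst hkp; rw [if_pos rfl, if_pos (Nat.lt_succ_self k), hind]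
      · have hiff : (k < p + 1) ↔ (k < p) := by omega
        simp only [if_neg hkp, hiff]
    · have hind : ind6 (PySem.List.pyGetD row (p : Int) 0) = 0 := by
        unfold ind6; rw [if_neg h6]
      rw [if_neg h6, Prod.mk.injEq]
      refine ⟨by rw [hind]; ring, ?_⟩
      apply List.map_congr_left; intro k hk
      by_cases hkp : k = p
      · subst hkp; rw [if_neg (Nat.lt_irrefl k), if_pos (Nat.lt_succ_self k), hind, add_zero]
      · have hiff : (k < p + 1) ↔ (k < p) := by omega
        simp only [hiff]

lemma innerB_eq (N : Nat) (row : List Int) (g : Nat → Int) :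
    innerB (N : Int) row ((List.range N).map g)
      = (cnt (fun j => PySem.List.pyGetD row j 0) N,
         (List.range N).map (fun k => g k + ind6 (PySem.List.pyGetD row (k : Int) 0))) := by
  unfold innerB
  rw [innerB_prefix N row g N le_rfl 0, Prod.mk.injEq]
  refine ⟨by ring, ?_⟩
  apply List.map_congr_left; intro k hk
  simp [List.mem_range.mp hk]

-- B's row pass
lemma rowpass_eq (N : Nat) (rs : List (List Int)) (c0 : Int) (g : Nat → Int) :
    rs.foldl (fun (s : Int × List Int) row =>
        let t := innerB (N : Int) row s.2
        (if PySem.List.pyGetD row ((N : Int) - 1) 0 < 6 ∧ t.1 > 1 then s.1 + (t.1 - 1) else s.1, t.2))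
      (c0, (List.range N).map g)
      = (c0 + (rs.map (fun row => contrib (fun j => PySem.List.pyGetD row j 0) N)).sum,
         (List.range N).map (fun k => g k + (rs.map (fun row => ind6 (PySem.List.pyGetD row (k : Int) 0))).sum)) := by
  induction rs generalizing c0 g with
  | nil => simp
  | cons r rest ih =>
    simp only [List.foldl_cons, innerB_eq, List.map_cons, List.sum_cons]
    rw [ih, Prod.mk.injEq]
    refine ⟨?_, ?_⟩
    · simp only [contrib]
      split_ifs <;> ring
    · apply List.map_congr_left; intro k hk; ring

-- turn 'for i in range(len matrix): f(matrix[i])' sums into sums over the rows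
lemma map_rows (matrix : List (List Int)) (F : List Int → Int) :
    (PySem.List.pyRange 0 (matrix.length : Int) 1).map
        (fun i => F (PySem.List.pyGetD matrix i [])) = matrix.map F := by
  have h := PySem.List.map_pyGetD_pyRange_zero' matrix ([] : List Int)
  calc (PySem.List.pyRange 0 (matrix.length : Int) 1).map
        (fun i => F (PySem.List.pyGetD matrix i []))
      = ((PySem.List.pyRange 0 (matrix.length : Int) 1).map
          (fun i => PySem.List.pyGetD matrix i [])).map F := by rw [List.map_map]; rfl
    _ = matrix.map F := by rw [h]

-- ===== VERDICT (by name: the statement is the Claim_ definition above) =====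
theorem check_bulb_conflict_spec : Claim_equal_check_bulb_conflict := by
  intro matrix _ _
  unfold Spec_check_bulb_conflict
  by_cases h0 : matrix.length = 0
  · have : matrix = [] := List.eq_nil_of_length_eq_zero h0
    subst this; decide
  · have hN : 0 < matrix.length := Nat.pos_of_ne_zero h0
    have hrep : List.replicate matrix.length (0 : Int)
        = (List.range matrix.length).map (fun _ => 0) := by simp
    simp only [check_bulb_conflict, check_bulb_conflict_alt,
      innerA_eq matrix.length hN, hrep, rowpass_eq,
      if_neg (by exact_mod_cast h0 : ¬ ((matrix.length : Int) = 0))]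
    rw [PySem.List.foldl_add, PySem.List.foldl_add,
      foldl_ite_add _ (fun i => PySem.List.pyGetD (PySem.List.pyGetD matrix ((matrix.length : Int) - 1) []) i 0 < 6 ∧
        PySem.List.pyGetD ((List.range matrix.length).map
          (fun (k : Nat) => 0 + (matrix.map (fun row => ind6 (PySem.List.pyGetD row (k : Int) 0))).sum)) i 0 > 1)]
    rw [map_rows matrix (fun row => contrib (fun j => PySem.List.pyGetD row j 0) matrix.length)]
    have hcol : ∀ i ∈ PySem.List.pyRange 0 (matrix.length : Int) 1,
        contrib (fun j => PySem.List.pyGetD (PySem.List.pyGetD matrix j []) i 0) matrix.length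
        = (if PySem.List.pyGetD (PySem.List.pyGetD matrix ((matrix.length : Int) - 1) []) i 0 < 6 ∧
              PySem.List.pyGetD ((List.range matrix.length).map
                (fun (k : Nat) => 0 + (matrix.map (fun row => ind6 (PySem.List.pyGetD row (k : Int) 0))).sum)) i 0 > 1
            then PySem.List.pyGetD ((List.range matrix.length).map
                (fun (k : Nat) => 0 + (matrix.map (fun row => ind6 (PySem.List.pyGetD row (k : Int) 0))).sum)) i 0 - 1
            else 0) := by
      intro i hi
      rw [PySem.List.mem_pyRange_one] at hi
      have hi0 : 0 ≤ i := hi.1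
      have hiN : i.toNat < matrix.length := by omega
      have hgetcb : PySem.List.pyGetD ((List.range matrix.length).map
          (fun (k : Nat) => 0 + (matrix.map (fun row => ind6 (PySem.List.pyGetD row (k : Int) 0))).sum)) i 0
          = (matrix.map (fun row => ind6 (PySem.List.pyGetD row i 0))).sum := by
        have hti : (i.toNat : Int) = i := by omega
        conv_lhs => rw [← hti]
        rw [PySem.List.pyGetD_natCast, List.getD_eq_getElem?_getD]
        simp only [List.getElem?_map, List.getElem?_range, hiN, Option.map_some,
          Option.getD_some, zero_add]
        apply congrArg
        apply List.map_congr_left; intro r hr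
        conv_rhs => rw [← hti]
      have hcnt : cnt (fun j => PySem.List.pyGetD (PySem.List.pyGetD matrix j []) i 0) matrix.length
          = (matrix.map (fun row => ind6 (PySem.List.pyGetD row i 0))).sum := by
        unfold cnt
        rw [show (PySem.List.pyRange 0 (matrix.length : Int) 1).map
              (fun j => ind6 (PySem.List.pyGetD (PySem.List.pyGetD matrix j []) i 0))
            = matrix.map (fun row => ind6 (PySem.List.pyGetD row i 0)) from
          map_rows matrix (fun row => ind6 (PySem.List.pyGetD row i 0))]
      unfold contrib
      rw [hgetcb, hcnt]
    rw [List.map_congr_left hcol]
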